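-- pv_equiv track=rewrite | github.com/SynthesisLab/DeepSynth2 | examples/pbe/transduction/knowledge_graph/preprocess_tasks.py | sketch
-- ===== SOURCE A (Python) =====
-- from typing import Dict, List, Optional, Tuple, Union
--
-- def sketch(output: str, constants: List[str]) -> List[str]:
--     out = []
--     i, j, last = 0, 0, 0
--     while i < len(output) and j < len(constants):
--         if output[i:].startswith(constants[j]):
--             if i - last > 0:
--                 out.append(output[last:i])
--             i += len(constants[j])
--             last = i
--             j += 1
--             if j == len(constants):
--                 if i < len(output):
--                     out.append(output[i:])
--                 break
--         i += 1
--     return out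
-- ===== SOURCE B (Python) =====
-- # Rabin-Karp: locate each constant by sliding a rolling hash window over the
-- # output (verifying on hash hits), instead of per-position startswith.
-- _M = (1 << 61) - 1
-- _B = 131
--
--
-- def _hash(s):
--     h = 0
--     for ch in s:
--         h = (h * _B + ord(ch)) % _M
--     return h
--
--
-- def _rk_find(s, pat, start):
--     """Leftmost index k >= start with s[k:k+len(pat)] == pat, else -1."""
--     n, m = len(s), len(pat)
--     if start + m > n:
--         return -1
--     ph = _hash(pat)
--     powm = pow(_B, m - 1, _M) if m > 0 else 0
--     wh = _hash(s[start:start + m])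
--     p = start
--     while True:
--         if wh == ph and s[p:p + m] == pat:
--             return p
--         if p + m >= n:
--             return -1
--         wh = ((wh + _M - (ord(s[p]) * powm) % _M) * _B + ord(s[p + m])) % _M
--         p += 1
--
--
-- def sketch(output, constants):
--     n = len(output)
--     out = []
--     last = 0
--     start = 0
--     for j, c in enumerate(constants):
--         k = _rk_find(output, c, start)
--         if k == -1 or k >= n:
--             return out
--         if k > last:
--             out.append(output[last:k])
--         last = k + len(c)
--         if j == len(constants) - 1:
--             if last < n:
--                 out.append(output[last:])
--             return out
--         start = last + 1
--     return []
-- ===== Notes on version B (the rewrite author's own statement) =====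
-- stated objective: faster
-- what changed: B locates each constant with a Rabin-Karp rolling-hash sliding window (O(1) hash update per position, full comparison only on hash hits) instead of A's per-position startswith check on a freshly copied suffix slice.
import Mathlib
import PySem

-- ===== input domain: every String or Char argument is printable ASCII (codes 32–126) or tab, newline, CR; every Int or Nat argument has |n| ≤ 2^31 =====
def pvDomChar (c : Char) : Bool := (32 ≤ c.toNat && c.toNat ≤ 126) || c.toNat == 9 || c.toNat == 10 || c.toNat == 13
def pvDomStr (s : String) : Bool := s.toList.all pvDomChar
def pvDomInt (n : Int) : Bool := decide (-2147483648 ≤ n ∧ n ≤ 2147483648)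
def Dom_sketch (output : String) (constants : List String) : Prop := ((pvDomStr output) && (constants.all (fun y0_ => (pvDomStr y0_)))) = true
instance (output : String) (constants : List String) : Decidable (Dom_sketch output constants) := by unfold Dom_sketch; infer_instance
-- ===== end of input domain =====

-- B replaces A's per-position startswith scan with a Rabin-Karp rolling-hash search for each
-- constant (verifying candidate positions on hash hits); same return value on every input.

-- ===== PORT A =====
-- A's while loop: i scans the string, j indexes constants (here: the remaining constants list),
-- last marks the end of the previous match.  Note Python's `i += 1` runs after a match too.
def sketchLoopA (s : List Char) (i last : Nat) (out : List String) : List String → List String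
  | [] => out
  | c :: rest =>
    if hlt : i < s.length then
      if PySem.Chars.startswith (PySem.List.slice s (some (i:Int)) none) c.toList then
        let out' := if 0 < i - last then out ++ [String.ofList (PySem.List.slice s (some (last:Int)) (some (i:Int)))] else out
        match rest with
        | [] =>
          if i + c.toList.length < s.length then
            out' ++ [String.ofList (PySem.List.slice s (some ((i + c.toList.length : Nat):Int)) none)]
          else out'
        | c' :: rest' => sketchLoopA s (i + c.toList.length + 1) (i + c.toList.length) out' (c' :: rest')
      else sketchLoopA s (i+1) last out (c :: rest)
    else out
termination_by cs => (cs.length, s.length - i)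
decreasing_by
  · exact Prod.Lex.left _ _ (by simp)
  · exact Prod.Lex.right _ (by omega)

def sketch (output : String) (constants : List String) : List String :=
  sketchLoopA output.toList 0 0 [] constants

-- ===== PORT B =====
-- Rabin-Karp modulus and base, as in Source B.
def rkM : Nat := 2305843009213693951
def rkB : Nat := 131

-- one step of the polynomial hash: h = (h*B + ord(c)) % M
def hstep (h : Nat) (c : Char) : Nat := (h * rkB + c.toNat) % rkM

-- _hash of Source B
def hashL (l : List Char) : Nat := l.foldl hstep 0

-- the while loop of _rk_find: slide the window, O(1) hash update, verify on hash hit.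
-- (s.drop p).take m is s[p:p+m] for 0 ≤ p; List.getD s p default is ord(s[p]) (p < n here).
def rkLoop (s pat : List Char) (ph powm : Nat) (wh p : Nat) : Int :=
  if wh = ph ∧ (s.drop p).take pat.length = pat then (p : Int)
  else if hle : s.length ≤ p + pat.length then -1
  else rkLoop s pat ph powm
    (((wh + rkM - ((s.getD p default).toNat * powm) % rkM) * rkB + (s.getD (p + pat.length) default).toNat) % rkM)
    (p + 1)
termination_by s.length - p
decreasing_by omega

-- _rk_find of Source B
def rkFind (s pat : List Char) (start : Nat) : Int :=
  if s.length < start + pat.length then -1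
  else rkLoop s pat (hashL pat)
    (if pat.length = 0 then 0 else rkB ^ (pat.length - 1) % rkM)
    (hashL ((s.drop start).take pat.length)) start

-- B's for loop over constants: Rabin-Karp-find each constant from `start`, gap is output[last:k].
def sketchLoopB (s : List Char) (last start : Nat) (out : List String) : List String → List String
  | [] => []
  | c :: rest =>
    let k := rkFind s c.toList start
    if k = -1 ∨ (s.length:Int) ≤ k then out
    else
      let out' := if (last:Int) < k then out ++ [String.ofList (PySem.List.slice s (some (last:Int)) (some k))] else out
      match rest with
      | [] =>
        if k.toNat + c.toList.length < s.length then
          out' ++ [String.ofList (PySem.List.slice s (some ((k.toNat + c.toList.length : Nat):Int)) none)]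
        else out'
      | c' :: rest' => sketchLoopB s (k.toNat + c.toList.length) (k.toNat + c.toList.length + 1) out' (c' :: rest')

def sketch_alt (output : String) (constants : List String) : List String :=
  sketchLoopB output.toList 0 0 [] constants

-- ===== PRECONDITION & SPEC =====
def Spec_sketch (output : String) (constants : List String) (out : List String) : Prop := out = sketch_alt output constants
instance (output : String) (constants : List String) (out : List String) : Decidable (Spec_sketch output constants out) := by unfold Spec_sketch; infer_instance

-- ===== CLAIM (what is proved, stated in full; the proofs are below) =====
def Claim_equal_sketch : Prop := ∀ (output : String) (constants : List String), Dom_sketch output constants → Spec_sketch output constants (sketch output constants)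

-- ===== LEMMAS AND PROOFS =====

-- hstep stays below the modulus
lemma hstep_lt (h : Nat) (c : Char) : hstep h c < rkM := by
  exact Nat.mod_lt _ (by norm_num [rkM])

lemma foldl_hstep_lt (l : List Char) (h : Nat) (hh : h < rkM) : l.foldl hstep h < rkM := by
  induction l generalizing h with
  | nil => exact hh
  | cons c t ih => exact ih _ (hstep_lt h c)

lemma hashL_lt (l : List Char) : hashL l < rkM :=
  foldl_hstep_lt l 0 (by norm_num [rkM])

-- cast of one hash step into ZMod rkM
lemma hstep_cast (h : Nat) (c : Char) :
    ((hstep h c : Nat) : ZMod rkM) = (h : ZMod rkM) * (rkB : ZMod rkM) + (c.toNat : ZMod rkM) := by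
  simp [hstep, ZMod.natCast_mod]

-- the polynomial-hash fold, cast to ZMod, splits off its accumulator
lemma foldl_hash_cast (l : List Char) (h : Nat) :
    ((l.foldl hstep h : Nat) : ZMod rkM)
      = (h : ZMod rkM) * (rkB : ZMod rkM) ^ l.length + ((l.foldl hstep 0 : Nat) : ZMod rkM) := by
  induction l generalizing h with
  | nil => simp
  | cons c t ih =>
    simp only [List.foldl_cons, List.length_cons]
    rw [ih (hstep h c), ih (hstep 0 c), hstep_cast, hstep_cast]
    push_cast
    ring

lemma hash_cons (c : Char) (l : List Char) :
    ((hashL (c :: l) : Nat) : ZMod rkM)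
      = (c.toNat : ZMod rkM) * (rkB : ZMod rkM) ^ l.length + ((hashL l : Nat) : ZMod rkM) := by
  simp only [hashL, List.foldl_cons]
  rw [foldl_hash_cast l (hstep 0 c), hstep_cast]
  ring

lemma hash_snoc (l : List Char) (d : Char) :
    ((hashL (l ++ [d]) : Nat) : ZMod rkM)
      = ((hashL l : Nat) : ZMod rkM) * (rkB : ZMod rkM) + (d.toNat : ZMod rkM) := by
  simp only [hashL, List.foldl_append, List.foldl_cons, List.foldl_nil]
  exact hstep_cast _ d

-- two naturals below the modulus that agree in ZMod rkM are equal
lemma eq_of_cast_eq_of_lt {a b : Nat} (ha : a < rkM) (hb : b < rkM)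
    (h : ((a : Nat) : ZMod rkM) = ((b : Nat) : ZMod rkM)) : a = b := by
  have := (ZMod.natCast_eq_natCast_iff a b rkM).mp h
  have := Nat.ModEq.eq_of_lt_of_lt this ha hb
  exact this

-- the rolling-hash slide: the updated value is the hash of the next window
lemma slide_hash (s : List Char) (p m : Nat) (hm : 1 ≤ m) (hlt : p + m < s.length) :
    ((hashL ((s.drop p).take m) + rkM
        - ((s.getD p default).toNat * (rkB ^ (m - 1) % rkM)) % rkM) * rkB
      + (s.getD (p + m) default).toNat) % rkM
    = hashL ((s.drop (p + 1)).take m) := by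
  have hp : p < s.length := by omega
  have hpm : p + m < s.length := hlt
  -- window p = c :: u, window (p+1) = u ++ [d]
  have hdropp : s.drop p = s[p] :: s.drop (p + 1) := List.drop_eq_getElem_cons hp
  have hu_len : m - 1 ≤ (s.drop (p + 1)).length := by simp [List.length_drop]; omega
  set u := (s.drop (p + 1)).take (m - 1) with hu
  have hulen : u.length = m - 1 := by
    simp [hu, List.length_take]; omega
  have hwinp : (s.drop p).take m = s[p] :: u := by
    obtain ⟨m', rfl⟩ : ∃ m', m = m' + 1 := ⟨m - 1, by omega⟩
    rw [hu, hdropp, List.take_succ_cons]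
    norm_num
  have hidx : m - 1 < (s.drop (p + 1)).length := by simp [List.length_drop]; omega
  have hwinp1 : (s.drop (p + 1)).take m = u ++ [s[p + m]] := by
    obtain ⟨m', rfl⟩ : ∃ m', m = m' + 1 := ⟨m - 1, by omega⟩
    rw [List.take_add_one]
    congr 1
    have : (s.drop (p + 1))[m']? = some (s.drop (p + 1))[m'] := List.getElem?_eq_getElem hidx
    rw [this]
    simp [List.getElem_drop]
    congr 1
    omega
  have hgd : s.getD p default = s[p] := List.getD_eq_getElem s default hp
  have hgd2 : s.getD (p + m) default = s[p + m] := List.getD_eq_getElem s default hpm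
  -- both sides are < rkM; compare casts in ZMod rkM
  apply eq_of_cast_eq_of_lt (Nat.mod_lt _ (by norm_num [rkM])) (hashL_lt _)
  rw [ZMod.natCast_mod, hgd, hgd2, hwinp, hwinp1]
  have hsub : (s[p].toNat * (rkB ^ (m - 1) % rkM)) % rkM ≤ hashL (s[p] :: u) + rkM := by
    have := Nat.mod_lt (s[p].toNat * (rkB ^ (m - 1) % rkM)) (show 0 < rkM by norm_num [rkM])
    omega
  rw [Nat.cast_add, Nat.cast_mul, Nat.cast_sub hsub, Nat.cast_add]
  rw [hash_cons, hash_snoc, hulen]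
  push_cast [ZMod.natCast_mod, ZMod.natCast_self]
  ring

-- Specification of the Rabin-Karp loop: it returns the leftmost verified match position.
theorem rkLoop_spec (s pat : List Char) (powm wh p : Nat)
    (hpm : p + pat.length ≤ s.length)
    (hwh : wh = hashL ((s.drop p).take pat.length))
    (hpow : pat.length ≠ 0 → powm = rkB ^ (pat.length - 1) % rkM) :
    (rkLoop s pat (hashL pat) powm wh p = -1
        ∧ ∀ q, p ≤ q → q + pat.length ≤ s.length → ¬ pat <+: s.drop q)
  ∨ (∃ k : Nat, rkLoop s pat (hashL pat) powm wh p = (k : Int)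
        ∧ p ≤ k ∧ k + pat.length ≤ s.length ∧ pat <+: s.drop k
        ∧ ∀ q, p ≤ q → q < k → ¬ pat <+: s.drop q) := by
  rw [rkLoop]
  by_cases hc : wh = hashL pat ∧ (s.drop p).take pat.length = pat
  · refine Or.inr ⟨p, ?_, le_refl p, hpm, ?_, fun q h1 h2 => absurd (le_trans h1 (le_of_lt h2)) (by omega)⟩
    · simp [hc]
    · exact (List.prefix_iff_eq_take.mpr hc.2.symm)
  · have hnopre : ¬ pat <+: s.drop p := by
      intro hpre
      apply hc
      have htake : (s.drop p).take pat.length = pat := (List.prefix_iff_eq_take.mp hpre).symm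
      exact ⟨by rw [hwh, htake], htake⟩
    by_cases hle : s.length ≤ p + pat.length
    · refine Or.inl ⟨by simp [hc, hle], fun q h1 h2 hpre => ?_⟩
      have : q = p := by omega
      exact hnopre (this ▸ hpre)
    · -- slide the window
      have hm : 1 ≤ pat.length := by
        by_contra h
        apply hc
        have h0 : pat.length = 0 := by omega
        have hp0 : pat = [] := List.length_eq_zero_iff.mp h0
        constructor <;> simp [hwh, hp0, hashL]
      have hlt : p + pat.length < s.length := by omega
      have hpow' : powm = rkB ^ (pat.length - 1) % rkM := hpow (by omega)
      have hwh' : ((wh + rkM - ((s.getD p default).toNat * powm) % rkM) * rkB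
            + (s.getD (p + pat.length) default).toNat) % rkM
          = hashL ((s.drop (p + 1)).take pat.length) := by
        rw [hwh, hpow']
        exact slide_hash s p pat.length hm hlt
      have ih := rkLoop_spec s pat powm _ (p + 1) (by omega) hwh' hpow
      simp only [hc, if_false, dif_neg hle]
      rcases ih with ⟨heq, hno⟩ | ⟨k, heq, hk1, hk2, hk3, hk4⟩
      · refine Or.inl ⟨heq, fun q h1 h2 hpre => ?_⟩
        rcases Nat.eq_or_lt_of_le h1 with h | h
        · exact hnopre (h ▸ hpre)
        · exact hno q (by omega) h2 hpre
      · refine Or.inr ⟨k, heq, by omega, hk2, hk3, fun q h1 h2 hpre => ?_⟩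
        rcases Nat.eq_or_lt_of_le h1 with h | h
        · exact hnopre (h ▸ hpre)
        · exact hk4 q (by omega) h2 hpre
termination_by s.length - p
decreasing_by omega

-- Specification of rkFind: -1 with no match at or after start, or the leftmost match.
theorem rkFind_spec (s pat : List Char) (start : Nat) :
    (rkFind s pat start = -1
        ∧ ∀ q, start ≤ q → q + pat.length ≤ s.length → ¬ pat <+: s.drop q)
  ∨ (∃ k : Nat, rkFind s pat start = (k : Int)
        ∧ start ≤ k ∧ k + pat.length ≤ s.length ∧ pat <+: s.drop k
        ∧ ∀ q, start ≤ q → q < k → ¬ pat <+: s.drop q) := by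
  rw [rkFind]
  by_cases h : s.length < start + pat.length
  · refine Or.inl ⟨by simp [h], fun q h1 h2 _ => by omega⟩
  · rw [if_neg h]
    exact rkLoop_spec s pat _ _ start (by omega) rfl (fun hm => by rw [if_neg hm])

lemma rkFind_past (s pat : List Char) (start : Nat) (h : s.length < start) :
    rkFind s pat start = -1 := by
  rw [rkFind, if_pos (by omega)]

-- a match at q implies q + |pat| ≤ |s|
lemma prefix_len_le (s pat : List Char) (q : Nat) (h : pat <+: s.drop q) (hq : q ≤ s.length) :
    q + pat.length ≤ s.length := by
  have := h.length_le
  simp only [List.length_drop] at this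
  omega

-- Main invariant: mid-scan, A at position i (with gap start `last`, scan started at `start`,
-- no match of the current constant in [start, i)) equals B about to run rkFind from `start`.
theorem scanEq (s : List Char) (c : String) (rest : List String) (last start i : Nat)
    (out : List String)
    (h2 : start ≤ i) (h3 : i ≤ s.length)
    (h4 : ∀ p, start ≤ p → p < i → ¬ (c.toList <+: s.drop p)) :
    sketchLoopA s i last out (c :: rest) = sketchLoopB s last start out (c :: rest) := by
  rw [sketchLoopA, sketchLoopB]
  by_cases hlt : i < s.length
  · simp only [hlt, dif_pos]
    by_cases hsw : PySem.Chars.startswith (PySem.List.slice s (some (i:Int)) none) c.toList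
    · -- A matches at i; show rkFind from start returns exactly i
      have hpre : c.toList <+: s.drop i := by
        rw [PySem.List.slice_from_natCast] at hsw
        exact (PySem.Chars.startswith_iff _ _).mp hsw
      have him : i + c.toList.length ≤ s.length := prefix_len_le s c.toList i hpre h3
      rcases rkFind_spec s c.toList start with ⟨_, hno⟩ | ⟨k, hkeq, hk1, hk2, hk3, hk4⟩
      · exact absurd hpre (hno i h2 him)
      · have hky : k ≤ i := by
          by_contra hgt
          exact hk4 i h2 (by omega) hpre
        have hle_kn : i ≤ k := by
          by_contra hgt
          exact h4 k hk1 (by omega) hk3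
        have hkeqi : k = i := by omega
        subst hkeqi
        rw [hkeq]
        have hcond : ¬ ((k : Int) = -1 ∨ (s.length:Int) ≤ (k : Int)) := by
          push Not
          constructor
          · omega
          · exact_mod_cast hlt
        simp only [hsw, if_pos, hcond, if_neg, not_false_iff]
        have hout' : (if 0 < k - last then out ++ [String.ofList (PySem.List.slice s (some (last:Int)) (some (k:Int)))] else out)
            = (if (last:Int) < (k:Int) then out ++ [String.ofList (PySem.List.slice s (some (last:Int)) (some (k:Int)))] else out) := by
          by_cases hl : last < k
          · rw [if_pos (by omega), if_pos (by exact_mod_cast hl)]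
          · rw [if_neg (by omega), if_neg (by exact_mod_cast hl)]
        have hknat : (Int.toNat (k : Int)) = k := Int.toNat_natCast k
        cases rest with
        | nil =>
          dsimp only
          rw [← hout', hknat]
        | cons c' rest' =>
          dsimp only
          rw [← hout', hknat]
          by_cases hfit : k + c.toList.length + 1 ≤ s.length
          · exact scanEq s c' rest' (k + c.toList.length) (k + c.toList.length + 1)
              (k + c.toList.length + 1) _ (le_refl _) hfit (by omega)
          · -- the skipped position is past the end: A exits the loop, B's rkFind returns -1
            rw [sketchLoopA.eq_def, sketchLoopB.eq_def]
            dsimp only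
            rw [dif_neg (by omega : ¬ (k + c.toList.length + 1 < s.length))]
            have hpast : rkFind s c'.toList (k + c.toList.length + 1) = -1 :=
              rkFind_past s c'.toList _ (by omega)
            simp only [hpast]
            rw [if_pos (Or.inl trivial)]
    · -- A steps to i+1
      simp only [hsw, Bool.false_eq_true, if_false]
      have := scanEq s c rest last start (i+1) out (by omega) (by omega)
        (by intro p hp1 hp2
            rcases Nat.lt_succ_iff_lt_or_eq.mp hp2 with h | h
            · exact h4 p hp1 h
            · subst h
              intro hc
              exact hsw (by rw [PySem.List.slice_from_natCast]
                            exact (PySem.Chars.startswith_iff _ _).mpr hc))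
      rw [sketchLoopB] at this
      exact this
  · -- i = s.length: A exits; B's rkFind reports no admissible match
    have hieq : i = s.length := by omega
    rw [dif_neg hlt]
    rcases rkFind_spec s c.toList start with ⟨hkeq, _⟩ | ⟨k, hkeq, hk1, hk2, hk3, hk4⟩
    · rw [hkeq, if_pos (Or.inl rfl)]
    · have hbig : s.length ≤ k := by
        by_contra hsmall
        exact h4 k hk1 (by omega) hk3
      rw [hkeq, if_pos (Or.inr (by exact_mod_cast hbig))]
termination_by (rest.length, s.length - i)
decreasing_by
  · exact Prod.Lex.left _ _ (by simp)
  · exact Prod.Lex.right _ (by omega)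

-- ===== VERDICT (by name: the statement is the Claim_ definition above) =====
theorem sketch_spec : Claim_equal_sketch := by
  intro output constants _
  unfold Spec_sketch sketch sketch_alt
  cases constants with
  | nil => rw [sketchLoopA, sketchLoopB]
  | cons c rest =>
    exact scanEq output.toList c rest 0 0 0 [] (le_refl 0) (Nat.zero_le _) (by omega)
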